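-- pv_equiv track=rewrite | github.com/UKGANG/Leetcode | google/MaximumPointsWithWeight.py | get_weighted_sum
-- ===== SOURCE A (Python) =====
-- from typing import List
--
-- def get_weighted_sum(left: List[int], right: List[int], weight: List[int]) -> int:
--     dp = [None] * (len(left) + 1)
--     for i in range(len(dp)):
--         dp[i] = [0] * (len(right) + 1)
--     for i in range(1, len(left) + 1):
--         dp[i][0] = dp[i - 1][0] + left[i - 1] * weight[i - 1]
--
--     for i in range(1, len(right) + 1):
--         dp[0][i] = dp[0][i - 1] + right[i - 1] * weight[i - 1]
--
--     for i in range(1, len(left) + 1):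
--         for j in range(1, len(right) + 1):
--             dp[i][j] = max(
--                 dp[i - 1][j] + left[i - 1] * weight[i + j - 1],
--                 dp[i][j - 1] + right[j - 1] * weight[i + j - 1],
--             )
--     return dp[-1][-1]
-- ===== SOURCE B (Python) =====
-- from functools import lru_cache
-- from typing import List
--
-- def get_weighted_sum(left: List[int], right: List[int], weight: List[int]) -> int:
--     # top-down memoized recursion from the final corner inward
--     @lru_cache(maxsize=None)
--     def f(i, j):
--         if i == 0 and j == 0:
--             return 0
--         if i == 0:
--             return right[j - 1] * weight[j - 1] + f(0, j - 1)
--         if j == 0: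
--             return left[i - 1] * weight[i - 1] + f(i - 1, 0)
--         w = weight[i + j - 1]
--         return max(left[i - 1] * w + f(i - 1, j),
--                    right[j - 1] * w + f(i, j - 1))
--     return f(len(left), len(right))
-- ===== Notes on version B (the rewrite author's own statement) =====
-- stated objective: alternative
-- what changed: A's three imperative loops filling an (L+1)x(R+1) DP table bottom-up are replaced by a top-down memoized recursion f(i,j) from the final corner with the base cases handled by the recursion itself.
import Mathlib
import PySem

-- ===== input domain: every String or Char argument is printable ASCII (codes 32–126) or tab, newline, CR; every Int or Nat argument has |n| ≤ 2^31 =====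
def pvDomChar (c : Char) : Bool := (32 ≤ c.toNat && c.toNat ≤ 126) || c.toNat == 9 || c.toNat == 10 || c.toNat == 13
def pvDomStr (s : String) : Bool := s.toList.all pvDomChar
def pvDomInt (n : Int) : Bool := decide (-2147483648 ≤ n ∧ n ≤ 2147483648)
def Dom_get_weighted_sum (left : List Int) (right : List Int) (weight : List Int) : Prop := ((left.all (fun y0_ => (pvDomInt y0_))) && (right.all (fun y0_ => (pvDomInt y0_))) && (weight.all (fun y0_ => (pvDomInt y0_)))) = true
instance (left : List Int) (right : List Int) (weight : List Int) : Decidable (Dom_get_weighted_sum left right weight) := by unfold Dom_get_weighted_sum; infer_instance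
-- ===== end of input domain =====

-- B replaces A's bottom-up DP table fill by a top-down recursion f(i,j) from the final corner (objective: alternative decomposition, same cost).

-- ===== PORT A =====
-- cell read dp[i][j] (every read A performs is in range on Pre_ inputs; the default only pads excluded inputs)
def tblGet (dp : List (List Int)) (i j : Nat) : Int := (dp.getD i []).getD j 0
-- cell write dp[i][j] = v
def tblSet (dp : List (List Int)) (i j : Nat) (v : Int) : List (List Int) :=
  dp.set i ((dp.getD i []).set j v)

-- literal transliteration of A: the init loop writing a fresh [0]*(R+1) row into each
-- slot of [None]*(L+1) builds exactly the (L+1)×(R+1) zero grid; range(1, n+1) is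
-- List.range' 1 n; list reads (in range under Pre_) ported with getD; dp[-1][-1] is
-- cell (L, R) since dp always has L+1 rows of length R+1.
def get_weighted_sum (left : List Int) (right : List Int) (weight : List Int) : Int :=
  let L := left.length
  let R := right.length
  let dp0 : List (List Int) := List.replicate (L + 1) (List.replicate (R + 1) (0 : Int))
  let dp1 := (List.range' 1 L).foldl
    (fun dp i => tblSet dp i 0 (tblGet dp (i - 1) 0 + left.getD (i - 1) 0 * weight.getD (i - 1) 0)) dp0
  let dp2 := (List.range' 1 R).foldl
    (fun dp j => tblSet dp 0 j (tblGet dp 0 (j - 1) + right.getD (j - 1) 0 * weight.getD (j - 1) 0)) dp1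
  let dp3 := (List.range' 1 L).foldl
    (fun dp i => (List.range' 1 R).foldl
      (fun dp j => tblSet dp i j
        (max (tblGet dp (i - 1) j + left.getD (i - 1) 0 * weight.getD (i + j - 1) 0)
             (tblGet dp i (j - 1) + right.getD (j - 1) 0 * weight.getD (i + j - 1) 0))) dp) dp2
  tblGet dp3 L R

-- ===== PORT B =====
-- top-down recursion f(i, j) of Source B (the lru_cache memoization is an evaluation strategy, same values)
def pvF (left : List Int) (right : List Int) (weight : List Int) : Nat → Nat → Int
  | 0, 0 => 0
  | 0, j + 1 => right.getD j 0 * weight.getD j 0 + pvF left right weight 0 j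
  | i + 1, 0 => left.getD i 0 * weight.getD i 0 + pvF left right weight i 0
  | i + 1, j + 1 =>
    let w := weight.getD (i + j + 1) 0
    max (left.getD i 0 * w + pvF left right weight i (j + 1))
        (right.getD j 0 * w + pvF left right weight (i + 1) j)

def get_weighted_sum_alt (left : List Int) (right : List Int) (weight : List Int) : Int :=
  pvF left right weight left.length right.length

-- ===== PRECONDITION & SPEC =====
-- A raises IndexError exactly when weight is shorter than len(left)+len(right) (it reads weight up to index len(left)+len(right)-1); B raises there too.
def Pre_get_weighted_sum (left : List Int) (right : List Int) (weight : List Int) : Prop :=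
  left.length + right.length ≤ weight.length
instance (left : List Int) (right : List Int) (weight : List Int) : Decidable (Pre_get_weighted_sum left right weight) := by unfold Pre_get_weighted_sum; infer_instance

def pvWitness_get_weighted_sum : List Int × List Int × List Int := ([1, -2], [3], [2, 0, 5])

def Spec_get_weighted_sum (left : List Int) (right : List Int) (weight : List Int) (out : Int) : Prop := out = get_weighted_sum_alt left right weight
instance (left : List Int) (right : List Int) (weight : List Int) (out : Int) : Decidable (Spec_get_weighted_sum left right weight out) := by unfold Spec_get_weighted_sum; infer_instance

-- ===== CLAIM (what is proved, stated in full; the proofs are below) =====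
def Claim_equal_get_weighted_sum : Prop := ∀ (left : List Int) (right : List Int) (weight : List Int), Dom_get_weighted_sum left right weight → Pre_get_weighted_sum left right weight → Spec_get_weighted_sum left right weight (get_weighted_sum left right weight)

-- ===== LEMMAS AND PROOFS =====

-- table shape: L+1 rows, each of length R+1
def Shape (L R : Nat) (dp : List (List Int)) : Prop :=
  dp.length = L + 1 ∧ ∀ k, k ≤ L → (dp.getD k []).length = R + 1

theorem tblGet_tblSet_self {dp : List (List Int)} {i j : Nat} {v : Int}
    (hi : i < dp.length) (hj : j < (dp.getD i []).length) :
    tblGet (tblSet dp i j v) i j = v := by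
  simp only [tblGet, tblSet, List.getD]
  rw [List.getElem?_set_self hi]
  simp only [Option.getD_some]
  rw [List.getElem?_set_self (by simpa [List.getD] using hj)]
  rfl

theorem tblGet_tblSet_ne {dp : List (List Int)} {i j i' j' : Nat} {v : Int}
    (h : i ≠ i' ∨ j ≠ j') :
    tblGet (tblSet dp i j v) i' j' = tblGet dp i' j' := by
  rcases h with h | h
  · simp only [tblGet, tblSet, List.getD]
    rw [List.getElem?_set_ne h]
  · by_cases hi : i' = i
    · subst hi
      by_cases hlen : i' < dp.length
      · simp only [tblGet, tblSet, List.getD]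
        rw [List.getElem?_set_self hlen]
        simp only [Option.getD_some]
        rw [List.getElem?_set_ne h]
      · simp only [tblGet, tblSet,
          List.set_eq_of_length_le (by omega : dp.length ≤ i')]
    · simp only [tblGet, tblSet, List.getD]
      rw [List.getElem?_set_ne (fun e => hi e.symm)]

theorem shape_tblSet {L R : Nat} {dp : List (List Int)} {i j : Nat} {v : Int}
    (h : Shape L R dp) : Shape L R (tblSet dp i j v) := by
  obtain ⟨h1, h2⟩ := h
  refine ⟨by simp [tblSet, h1], fun k hk => ?_⟩
  by_cases hki : k = i
  · subst hki
    by_cases hlen : k < dp.length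
    · simp only [tblSet, List.getD]
      rw [List.getElem?_set_self hlen]
      simpa using h2 k hk
    · simp only [tblSet, List.set_eq_of_length_le (by omega : dp.length ≤ k)]
      exact h2 k hk
  · simp only [tblSet, List.getD]
    rw [List.getElem?_set_ne (fun e => hki e.symm)]
    exact h2 k hk

theorem tblGet_zero_grid (L R i j : Nat) :
    tblGet (List.replicate (L + 1) (List.replicate (R + 1) (0 : Int))) i j = 0 := by
  unfold tblGet List.getD
  by_cases hi : i < L + 1
  · rw [List.getElem?_replicate_of_lt hi]
    by_cases hj : j < R + 1
    · simp [List.getElem?_replicate_of_lt hj]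
    · simp [List.getElem?_eq_none (by simpa using by omega : (List.replicate (R+1) (0:Int)).length ≤ j)]
  · simp [List.getElem?_eq_none (by simpa using by omega : (List.replicate (L+1) (List.replicate (R+1) (0:Int))).length ≤ i)]

theorem range1_concat (n : Nat) : List.range' 1 (n + 1) = List.range' 1 n ++ [n + 1] := by
  rw [List.range'_concat]
  simp [Nat.add_comm]

-- loop 1 invariant: after the first n steps of the column-0 fill
theorem loop1_inv (left right weight : List Int) (n : Nat) (hn : n ≤ left.length) :
    Shape left.length right.length
      ((List.range' 1 n).foldl
        (fun dp i => tblSet dp i 0 (tblGet dp (i - 1) 0 + left.getD (i - 1) 0 * weight.getD (i - 1) 0))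
        (List.replicate (left.length + 1) (List.replicate (right.length + 1) (0 : Int)))) ∧
    ∀ i j, tblGet
      ((List.range' 1 n).foldl
        (fun dp i => tblSet dp i 0 (tblGet dp (i - 1) 0 + left.getD (i - 1) 0 * weight.getD (i - 1) 0))
        (List.replicate (left.length + 1) (List.replicate (right.length + 1) (0 : Int)))) i j =
      (if j = 0 ∧ i ≤ n then pvF left right weight i 0 else 0) := by
  induction n with
  | zero =>
    refine ⟨⟨by simp, fun k hk => ?_⟩, fun i j => ?_⟩
    · simp [List.getD, List.getElem?_replicate_of_lt (by omega : k < left.length + 1)]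
    · rw [List.range'_zero, List.foldl_nil, tblGet_zero_grid]
      split_ifs with h
      · obtain ⟨h1, h2⟩ := h
        interval_cases i
        simp [pvF]
      · rfl
  | succ n ih =>
    obtain ⟨hs, hg⟩ := ih (by omega)
    rw [range1_concat, List.foldl_append, List.foldl_cons, List.foldl_nil]
    refine ⟨shape_tblSet hs, fun i j => ?_⟩
    by_cases hij : i = n + 1 ∧ j = 0
    · obtain ⟨hi, hj⟩ := hij; subst hi; subst hj
      rw [tblGet_tblSet_self (by rw [hs.1]; omega)
        (by rw [hs.2 (n + 1) (by omega)]; omega)]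
      rw [hg]
      simp only [Nat.add_sub_cancel, and_true, le_refl, if_pos]
      simp [pvF]
      ring
    · rw [tblGet_tblSet_ne (by omega), hg]
      split_ifs with h1 h2 h2 <;> first | rfl | omega

-- the tables after loop 1, after loop 2, and after the nested loop 3
def dpA (left right weight : List Int) : List (List Int) :=
  (List.range' 1 left.length).foldl
    (fun dp i => tblSet dp i 0 (tblGet dp (i - 1) 0 + left.getD (i - 1) 0 * weight.getD (i - 1) 0))
    (List.replicate (left.length + 1) (List.replicate (right.length + 1) (0 : Int)))

def dpB (left right weight : List Int) : List (List Int) :=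
  (List.range' 1 right.length).foldl
    (fun dp j => tblSet dp 0 j (tblGet dp 0 (j - 1) + right.getD (j - 1) 0 * weight.getD (j - 1) 0))
    (dpA left right weight)

def dpC (left right weight : List Int) : List (List Int) :=
  (List.range' 1 left.length).foldl
    (fun dp i => (List.range' 1 right.length).foldl
      (fun dp j => tblSet dp i j
        (max (tblGet dp (i - 1) j + left.getD (i - 1) 0 * weight.getD (i + j - 1) 0)
             (tblGet dp i (j - 1) + right.getD (j - 1) 0 * weight.getD (i + j - 1) 0))) dp)
    (dpB left right weight)

theorem get_weighted_sum_eq_dpC (left right weight : List Int) :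
    get_weighted_sum left right weight = tblGet (dpC left right weight) left.length right.length := rfl

-- state after loops 1 and 2 (partial: first n steps of loop 2)
theorem loop2_inv (left right weight : List Int) (n : Nat) (hn : n ≤ right.length) :
    Shape left.length right.length
      ((List.range' 1 n).foldl
        (fun dp j => tblSet dp 0 j (tblGet dp 0 (j - 1) + right.getD (j - 1) 0 * weight.getD (j - 1) 0))
        (dpA left right weight)) ∧
    ∀ i j, tblGet
      ((List.range' 1 n).foldl
        (fun dp j => tblSet dp 0 j (tblGet dp 0 (j - 1) + right.getD (j - 1) 0 * weight.getD (j - 1) 0))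
        (dpA left right weight)) i j =
      (if j = 0 ∧ i ≤ left.length then pvF left right weight i 0
       else if i = 0 ∧ j ≤ n then pvF left right weight 0 j else 0) := by
  induction n with
  | zero =>
    obtain ⟨hs, hg⟩ := loop1_inv left right weight left.length le_rfl
    refine ⟨hs, fun i j => ?_⟩
    rw [List.range'_zero, List.foldl_nil]
    rw [show tblGet (dpA left right weight) i j =
      (if j = 0 ∧ i ≤ left.length then pvF left right weight i 0 else 0) from hg i j]
    split_ifs with h1 h2 <;> first | rfl | omega
  | succ n ih =>
    obtain ⟨hs, hg⟩ := ih (by omega)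
    rw [range1_concat, List.foldl_append, List.foldl_cons, List.foldl_nil]
    refine ⟨shape_tblSet hs, fun i j => ?_⟩
    by_cases hij : i = 0 ∧ j = n + 1
    · obtain ⟨hi, hj⟩ := hij; subst hi; subst hj
      rw [tblGet_tblSet_self (by rw [hs.1]; omega)
        (by rw [hs.2 0 (by omega)]; omega)]
      rw [hg]
      simp only [Nat.add_sub_cancel]
      split_ifs <;> first | rfl | omega | (simp_all [pvF]; try ring)
    · rw [tblGet_tblSet_ne (by omega), hg]
      split_ifs <;> first | rfl | omega

-- inner loop of loop 3: filling row m+1, first n cells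
theorem loop3_inner_inv (left right weight : List Int) (m : Nat) (hm : m + 1 ≤ left.length)
    (dp : List (List Int)) (hs : Shape left.length right.length dp)
    (hd : ∀ i j, tblGet dp i j =
      (if i ≤ m ∧ j ≤ right.length then pvF left right weight i j
       else if j = 0 ∧ i ≤ left.length then pvF left right weight i 0
       else if i = 0 ∧ j ≤ right.length then pvF left right weight 0 j else 0))
    (n : Nat) (hn : n ≤ right.length) :
    Shape left.length right.length
      ((List.range' 1 n).foldl
        (fun dp j => tblSet dp (m + 1) j
          (max (tblGet dp (m + 1 - 1) j + left.getD (m + 1 - 1) 0 * weight.getD (m + 1 + j - 1) 0)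
               (tblGet dp (m + 1) (j - 1) + right.getD (j - 1) 0 * weight.getD (m + 1 + j - 1) 0))) dp) ∧
    ∀ i j, tblGet
      ((List.range' 1 n).foldl
        (fun dp j => tblSet dp (m + 1) j
          (max (tblGet dp (m + 1 - 1) j + left.getD (m + 1 - 1) 0 * weight.getD (m + 1 + j - 1) 0)
               (tblGet dp (m + 1) (j - 1) + right.getD (j - 1) 0 * weight.getD (m + 1 + j - 1) 0))) dp) i j =
      (if i = m + 1 ∧ 1 ≤ j ∧ j ≤ n then pvF left right weight i j
       else if i ≤ m ∧ j ≤ right.length then pvF left right weight i j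
       else if j = 0 ∧ i ≤ left.length then pvF left right weight i 0
       else if i = 0 ∧ j ≤ right.length then pvF left right weight 0 j else 0) := by
  induction n with
  | zero =>
    refine ⟨hs, fun i j => ?_⟩
    rw [List.range'_zero, List.foldl_nil, hd]
    split_ifs <;> first | rfl | omega
  | succ n ih =>
    obtain ⟨hs', hg⟩ := ih (by omega)
    rw [range1_concat, List.foldl_append, List.foldl_cons, List.foldl_nil]
    refine ⟨shape_tblSet hs', fun i j => ?_⟩
    by_cases hij : i = m + 1 ∧ j = n + 1
    · obtain ⟨hi, hj⟩ := hij; subst hi; subst hj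
      rw [tblGet_tblSet_self (by rw [hs'.1]; omega)
        (by rw [hs'.2 (m + 1) (by omega)]; omega)]
      have e1 : tblGet
          ((List.range' 1 n).foldl
            (fun dp j => tblSet dp (m + 1) j
              (max (tblGet dp (m + 1 - 1) j + left.getD (m + 1 - 1) 0 * weight.getD (m + 1 + j - 1) 0)
                   (tblGet dp (m + 1) (j - 1) + right.getD (j - 1) 0 * weight.getD (m + 1 + j - 1) 0))) dp)
          (m + 1 - 1) (n + 1) = pvF left right weight m (n + 1) := by
        rw [hg]
        simp only [Nat.add_sub_cancel]
        split_ifs <;> first | rfl | omega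
      have e2 : tblGet
          ((List.range' 1 n).foldl
            (fun dp j => tblSet dp (m + 1) j
              (max (tblGet dp (m + 1 - 1) j + left.getD (m + 1 - 1) 0 * weight.getD (m + 1 + j - 1) 0)
                   (tblGet dp (m + 1) (j - 1) + right.getD (j - 1) 0 * weight.getD (m + 1 + j - 1) 0))) dp)
          (m + 1) (n + 1 - 1) = pvF left right weight (m + 1) n := by
        rw [hg]
        simp only [Nat.add_sub_cancel]
        split_ifs <;> first | rfl | omega | (simp_all [pvF]; try ring)
      rw [e1, e2]
      rw [if_pos (by omega)]
      have hw : m + 1 + (n + 1) - 1 = m + n + 1 := by omega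
      rw [hw]
      simp only [Nat.add_sub_cancel, pvF]
      rw [Int.add_comm (pvF left right weight m (n + 1)), Int.add_comm (pvF left right weight (m + 1) n)]
    · rw [tblGet_tblSet_ne (by omega), hg]
      split_ifs <;> first | rfl | omega

-- outer loop of loop 3: first n rows processed
theorem loop3_inv (left right weight : List Int) (n : Nat) (hn : n ≤ left.length) :
    Shape left.length right.length
      ((List.range' 1 n).foldl
        (fun dp i => (List.range' 1 right.length).foldl
          (fun dp j => tblSet dp i j
            (max (tblGet dp (i - 1) j + left.getD (i - 1) 0 * weight.getD (i + j - 1) 0)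
                 (tblGet dp i (j - 1) + right.getD (j - 1) 0 * weight.getD (i + j - 1) 0))) dp)
        (dpB left right weight)) ∧
    ∀ i j, tblGet
      ((List.range' 1 n).foldl
        (fun dp i => (List.range' 1 right.length).foldl
          (fun dp j => tblSet dp i j
            (max (tblGet dp (i - 1) j + left.getD (i - 1) 0 * weight.getD (i + j - 1) 0)
                 (tblGet dp i (j - 1) + right.getD (j - 1) 0 * weight.getD (i + j - 1) 0))) dp)
        (dpB left right weight)) i j =
      (if i ≤ n ∧ j ≤ right.length then pvF left right weight i j
       else if j = 0 ∧ i ≤ left.length then pvF left right weight i 0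
       else if i = 0 ∧ j ≤ right.length then pvF left right weight 0 j else 0) := by
  induction n with
  | zero =>
    obtain ⟨hs, hg⟩ := loop2_inv left right weight right.length le_rfl
    refine ⟨hs, fun i j => ?_⟩
    rw [List.range'_zero, List.foldl_nil]
    rw [show tblGet (dpB left right weight) i j =
      (if j = 0 ∧ i ≤ left.length then pvF left right weight i 0
       else if i = 0 ∧ j ≤ right.length then pvF left right weight 0 j else 0) from hg i j]
    split_ifs <;> first | rfl | omega | (simp_all [pvF]; try ring)
  | succ n ih =>
    obtain ⟨hs, hg⟩ := ih (by omega)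
    rw [range1_concat, List.foldl_append, List.foldl_cons, List.foldl_nil]
    obtain ⟨hs', hg'⟩ := loop3_inner_inv left right weight n (by omega) _ hs
      (fun i j => hg i j) right.length le_rfl
    refine ⟨hs', fun i j => ?_⟩
    rw [hg' i j]
    split_ifs <;> first | rfl | omega | simp_all

theorem get_weighted_sum_spec : Claim_equal_get_weighted_sum := by
  intro left right weight _ _
  unfold Spec_get_weighted_sum get_weighted_sum_alt
  rw [get_weighted_sum_eq_dpC]
  obtain ⟨_, hg⟩ := loop3_inv left right weight left.length le_rfl
  rw [show tblGet (dpC left right weight) left.length right.length =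
    (if left.length ≤ left.length ∧ right.length ≤ right.length then pvF left right weight left.length right.length
     else if right.length = 0 ∧ left.length ≤ left.length then pvF left right weight left.length 0
     else if left.length = 0 ∧ right.length ≤ right.length then pvF left right weight 0 right.length else 0)
    from hg left.length right.length]
  rw [if_pos ⟨le_rfl, le_rfl⟩]
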